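-- pv_equiv track=rewrite | github.com/angusmacdonald/advent-of-code | day7/day7-part2.py | get_hand_ordering
-- ===== SOURCE A (Python) =====
-- hand_index = ['J', '2', '3', '4', '5', '6',
--               '7', '8', '9', 'T', 'Q', 'K', 'A']
--
-- def get_hand_ordering(hand: str) -> int:
--     multiplier = 10
--
--     result = 0
--     for i in range(len(hand)):
--         next = len(hand) - i - 1
--         result += hand_index.index(hand[next]) * multiplier
--         multiplier *= 100
--
--     return result
-- ===== SOURCE B (Python) =====
-- _RANK = {c: i for i, c in enumerate(['J', '2', '3', '4', '5', '6',
--                                      '7', '8', '9', 'T', 'Q', 'K', 'A'])}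
--
-- def get_hand_ordering(hand: str) -> int:
--     result = 0
--     for ch in hand:
--         result = result * 100 + _RANK[ch]
--     return result * 10
-- ===== Notes on version B (the rewrite author's own statement) =====
-- stated objective: simpler
-- what changed: Replaces the reverse-indexed loop with an explicit power-of-100 multiplier by a left-to-right Horner accumulation (result = result*100 + rank) over the characters, with ranks from a precomputed dict instead of repeated list.index scans; one final *10 replaces the seeded multiplier.
import Mathlib
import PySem

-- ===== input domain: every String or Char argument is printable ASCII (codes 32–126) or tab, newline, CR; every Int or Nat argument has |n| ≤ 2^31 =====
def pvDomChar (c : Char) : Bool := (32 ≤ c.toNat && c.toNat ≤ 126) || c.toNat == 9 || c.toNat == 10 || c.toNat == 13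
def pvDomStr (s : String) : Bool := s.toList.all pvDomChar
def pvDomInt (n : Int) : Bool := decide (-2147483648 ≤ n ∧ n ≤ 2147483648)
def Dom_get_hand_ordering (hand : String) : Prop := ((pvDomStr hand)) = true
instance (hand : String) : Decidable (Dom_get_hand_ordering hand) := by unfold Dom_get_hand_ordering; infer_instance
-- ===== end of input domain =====

-- B replaces the reverse-indexed loop with a multiplier variable by a left-to-right
-- Horner accumulation over a precomputed rank dict (objective: simpler).

-- ===== PORT A =====
def hand_index : List Char :=
  ['J', '2', '3', '4', '5', '6', '7', '8', '9', 'T', 'Q', 'K', 'A']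

-- literal port of A's loop: state (result, multiplier); hand[next] is always in
-- range, ported with pyGetD (default never used); .index ported with index?
-- (getD 0 is never reached inside Pre_, where every char is in hand_index).
def get_hand_ordering (hand : String) : Int :=
  let l := hand.toList
  let n : Int := (l.length : Int)
  ((PySem.List.pyRange 0 n 1).foldl
    (fun (s : Int × Int) i =>
      let next := n - i - 1
      (s.1 + (((PySem.List.index? hand_index (PySem.List.pyGetD l next 'J')).getD 0 : Nat) : Int) * s.2,
       s.2 * 100))
    (0, 10)).1

-- ===== PORT B =====
-- the dict comprehension {c: i for i, c in enumerate([...])}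
def rank_dict : PySem.Dict Char Int :=
  (PySem.List.enumerate hand_index 0).foldl
    (fun d p => PySem.Dict.insert d p.2 p.1) PySem.Dict.empty

-- Horner: result = result*100 + _RANK[ch] over the characters, then *10
-- (getD 0 is never reached inside Pre_).
def get_hand_ordering_alt (hand : String) : Int :=
  (hand.toList.foldl (fun result ch => result * 100 + PySem.Dict.getD rank_dict ch 0) 0) * 10

-- ===== PRECONDITION & SPEC =====
-- Pre_: every character is one of the 13 cards; on any other character A raises
-- ValueError (list.index) and B raises KeyError.
def Pre_get_hand_ordering (hand : String) : Prop :=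
  hand.toList.all (fun c => hand_index.contains c) = true
instance (hand : String) : Decidable (Pre_get_hand_ordering hand) := by
  unfold Pre_get_hand_ordering; infer_instance

def pvWitness_get_hand_ordering : String := "KTJJT"

def Spec_get_hand_ordering (hand : String) (out : Int) : Prop := out = get_hand_ordering_alt hand
instance (hand : String) (out : Int) : Decidable (Spec_get_hand_ordering hand out) := by unfold Spec_get_hand_ordering; infer_instance

-- ===== CLAIM (what is proved, stated in full; the proofs are below) =====
def Claim_equal_get_hand_ordering : Prop := ∀ (hand : String), Dom_get_hand_ordering hand → Pre_get_hand_ordering hand → Spec_get_hand_ordering hand (get_hand_ordering hand)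

-- ===== LEMMAS AND PROOFS =====

-- rank of a char, as A computes it
def rankA (c : Char) : Int := ((PySem.List.index? hand_index c).getD 0 : Nat)

-- the dict lookup agrees with list.index on the 13 cards
lemma rank_dict_eq (c : Char) (hc : c ∈ hand_index) :
    PySem.Dict.getD rank_dict c 0 = rankA c := by
  fin_cases hc <;> decide

-- Horner fold (A's rank function)
def hornerA (l : List Char) : Int :=
  l.foldl (fun a c => a * 100 + rankA c) 0

lemma hornerA_append_singleton (t : List Char) (c : Char) :
    hornerA (t ++ [c]) = hornerA t * 100 + rankA c := by
  simp [hornerA, List.foldl_append]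

-- A's pair-state fold, processing chars in the given order with growing multiplier
lemma foldA_eq_horner (rl : List Char) (r m : Int) :
    ((rl.foldl (fun (s : Int × Int) c => (s.1 + rankA c * s.2, s.2 * 100)) (r, m)).1)
      = r + m * hornerA rl.reverse := by
  induction rl generalizing r m with
  | nil => simp [hornerA]
  | cons c rl ih =>
    simp only [List.foldl_cons, List.reverse_cons]
    rw [ih, hornerA_append_singleton]
    ring

-- the indices n-1-i for i in range(n) traverse the list in reverse
lemma map_pyGetD_rev (l : List Char) :
    (PySem.List.pyRange 0 (l.length : Int) 1).map
        (fun i => PySem.List.pyGetD l ((l.length : Int) - i - 1) 'J')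
      = l.reverse := by
  have h1 : (PySem.List.pyRange 0 (l.length : Int) 1).map
        (fun i => (l.length : Int) - i - 1)
      = (PySem.List.pyRange 0 (l.length : Int) 1).reverse := by
    have h2 := PySem.List.pyRange_neg_one_eq_reverse ((l.length : Int) - 1) (-1)
    simp only [neg_add_cancel, sub_add_cancel] at h2
    rw [← h2, PySem.List.pyRange_one, PySem.List.pyRange_neg_one, List.map_map]
    rw [show ((l.length : Int) - 1 - (-1)).toNat = ((l.length : Int) - 0).toNat by omega]
    apply List.map_congr_left
    intro k _
    simp; omega
  calc (PySem.List.pyRange 0 (l.length : Int) 1).map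
        (fun i => PySem.List.pyGetD l ((l.length : Int) - i - 1) 'J')
      = ((PySem.List.pyRange 0 (l.length : Int) 1).map
          (fun i => (l.length : Int) - i - 1)).map (fun j => PySem.List.pyGetD l j 'J') := by
        rw [List.map_map]
        rfl
    _ = ((PySem.List.pyRange 0 (l.length : Int) 1).map (fun j => PySem.List.pyGetD l j 'J')).reverse := by
        rw [h1, List.map_reverse]
    _ = l.reverse := by rw [PySem.List.map_pyGetD_pyRange_zero']

-- ===== VERDICT (by name: the statement is the Claim_ definition above) =====
theorem get_hand_ordering_spec : Claim_equal_get_hand_ordering := by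
  intro hand _ hpre0
  have hpre : ∀ c ∈ hand.toList, c ∈ hand_index := by
    unfold Pre_get_hand_ordering at hpre0
    simpa [List.all_eq_true] using hpre0
  unfold Spec_get_hand_ordering get_hand_ordering get_hand_ordering_alt
  set l := hand.toList with hl
  simp only []
  -- rewrite A's fold over indices as a fold over the reversed character list
  have hA : ((PySem.List.pyRange 0 (l.length : Int) 1).foldl
      (fun (s : Int × Int) i =>
        (s.1 + (((PySem.List.index? hand_index (PySem.List.pyGetD l ((l.length : Int) - i - 1) 'J')).getD 0 : Nat) : Int) * s.2,
         s.2 * 100)) (0, 10)).1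
      = ((l.reverse.foldl (fun (s : Int × Int) c => (s.1 + rankA c * s.2, s.2 * 100)) (0, 10)).1) := by
    rw [← map_pyGetD_rev l, List.foldl_map]
    rfl
  rw [hA, foldA_eq_horner]
  rw [List.reverse_reverse]
  have hB : l.foldl (fun result ch => result * 100 + PySem.Dict.getD rank_dict ch 0) 0
      = hornerA l := by
    unfold hornerA
    apply PySem.List.foldl_congr_mem
    intro acc x hx
    rw [rank_dict_eq x (hpre x hx)]
  rw [hB]
  ring
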